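-- pv_equiv track=rewrite | github.com/Kawser-nerd/CLCDSA | Source Codes/AtCoder/agc013/C/4089488.py | bit_full_search2
-- ===== SOURCE A (Python) =====
-- def bit_full_search2(A):
--     #https://blog.rossywhite.com/2018/08/06/bit-search/
--     value = []
--     for i in range(1 << len(A)):
--         output = []
--
--         for j in range(len(A)):
--             if ((i >> j) & 1) == 1:
--                 #output.append(A[j])
--                 output.append(A[j])
--         value.append([format(i, 'b').zfill(16), sum(output)])
--
--     value.sort(key=lambda x:x[1])
--     bin = [value[k][0] for k in range(len(value))]
--     val = [value[k][1] for k in range(len(value))]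
--     return bin, val
-- ===== SOURCE B (Python) =====
-- def bit_full_search2(A):
--     n = len(A)
--     size = 1 << n
--     sums = [0] * size
--     for i in range(1, size):
--         j = i.bit_length() - 1
--         sums[i] = sums[i ^ (1 << j)] + A[j]
--     value = sorted(([format(i, 'b').zfill(16), s] for i, s in enumerate(sums)),
--                    key=lambda x: x[1])
--     return [v[0] for v in value], [v[1] for v in value]
-- ===== Notes on version B (the rewrite author's own statement) =====
-- stated objective: alternative
-- what changed: Replaces A's per-mask inner bit-extraction loop by a DP over masks (sums[i] = sums[i with its highest set bit cleared] + A[top bit]), then labels, stable-sorts and unzips as before.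
import Mathlib
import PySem

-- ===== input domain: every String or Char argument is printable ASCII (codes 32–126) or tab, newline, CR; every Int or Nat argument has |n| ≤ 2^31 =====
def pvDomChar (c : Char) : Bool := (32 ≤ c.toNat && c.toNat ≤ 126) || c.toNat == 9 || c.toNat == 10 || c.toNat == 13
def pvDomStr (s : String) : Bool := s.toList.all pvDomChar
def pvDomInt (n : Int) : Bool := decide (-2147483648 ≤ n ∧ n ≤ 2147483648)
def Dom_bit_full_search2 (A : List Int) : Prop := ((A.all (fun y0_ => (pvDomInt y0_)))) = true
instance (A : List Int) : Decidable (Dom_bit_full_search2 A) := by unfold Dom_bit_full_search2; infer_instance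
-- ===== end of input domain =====

-- B computes each mask's subset sum by a DP over masks (sums[i] = sums[i with its highest set
-- bit cleared] + A[top bit]) instead of A's per-mask inner bit-extraction loop; equivalence is
-- about the return value (A sorts its local list in place, nothing the caller observes).

-- ===== PORT A =====
-- Python's two-element list [label, sum] is modelled as the pair String × Int.
def bit_full_search2 (A : List Int) : List String × List Int :=
  let value : List (String × Int) :=
    (PySem.List.pyRange 0 ((1 : Int) <<< A.length) 1).foldl
      (fun value i =>
        let output : List Int :=
          (PySem.List.pyRange 0 (PySem.List.len A) 1).foldl
            (fun output j =>
              -- (i >> j) & 1 == 1; j ranges over range(len(A)), so j ≥ 0 (j.toNat exact) and A[j] is in range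
              if PySem.Int.band (i >>> j.toNat) 1 == 1 then output ++ [PySem.List.pyGetD A j 0]
              else output) []
        value ++ [(PySem.Str.zfill (PySem.Int.toBin i) 16, output.sum)]) []
  let value := PySem.List.sorted value (fun x => x.2)
  let bin := (PySem.List.pyRange 0 (PySem.List.len value) 1).map (fun k => (PySem.List.pyGetD value k ("", 0)).1)
  let val := (PySem.List.pyRange 0 (PySem.List.len value) 1).map (fun k => (PySem.List.pyGetD value k ("", 0)).2)
  (bin, val)

-- ===== PORT B =====
def bit_full_search2_alt (A : List Int) : List String × List Int :=
  let n := A.length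
  let size : Nat := 1 <<< n
  let sums : List Int :=
    (List.range' 1 (size - 1)).foldl
      (fun (sums : List Int) (i : Nat) =>
        -- j = i.bit_length() - 1; i ≥ 1 here. sums[i ^ (1 << j)] and A[j] are in range (total getD forms).
        let j := PySem.Int.bitLength (i : Int) - 1
        sums.set i (sums.getD (i ^^^ (1 <<< j)) 0 + A.getD j 0))
      (List.replicate size 0)
  let value := PySem.List.sorted
      ((PySem.List.enumerate sums).map (fun iv => (PySem.Str.zfill (PySem.Int.toBin iv.1) 16, iv.2)))
      (fun x => x.2)
  (value.map (fun v => v.1), value.map (fun v => v.2))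

-- ===== PRECONDITION & SPEC =====
def Spec_bit_full_search2 (A : List Int) (out : List String × List Int) : Prop := out = bit_full_search2_alt A
instance (A : List Int) (out : List String × List Int) : Decidable (Spec_bit_full_search2 A out) := by unfold Spec_bit_full_search2; infer_instance

-- ===== CLAIM (what is proved, stated in full; the proofs are below) =====
def Claim_equal_bit_full_search2 : Prop := ∀ (A : List Int), Dom_bit_full_search2 A → Spec_bit_full_search2 A (bit_full_search2 A)

-- ===== LEMMAS AND PROOFS =====

-- subset sum selected by the bits of the mask k (the value both programs attach to mask k)
def pvF (A : List Int) (k : Nat) : Int :=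
  ∑ m ∈ Finset.range A.length, if k.testBit m then A.getD m 0 else 0

-- the common pre-sort list
def pvPre (A : List Int) : List (String × Int) :=
  (List.range (2 ^ A.length)).map (fun (k : Nat) => (PySem.Str.zfill (PySem.Int.toBin (k : Int)) 16, pvF A k))

theorem pv_sum_filter (g : Nat → Int) (p : Nat → Bool) (n : Nat) :
    (((List.range n).filter p).map g).sum = ∑ m ∈ Finset.range n, if p m then g m else 0 := by
  induction n with
  | zero => simp
  | succ n ih =>
    rw [List.range_succ, List.filter_append, List.map_append, List.sum_append,
      Finset.sum_range_succ, ih]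
    by_cases h : p n <;> simp [h]

theorem pv_cond (k m : Nat) : (PySem.Int.band ((k : Int) >>> m) 1 == 1) = k.testBit m := by
  have h1 : (k : Int) >>> m = ((k >>> m : Nat) : Int) := by
    simp [Int.shiftRight_eq_div_pow, Nat.shiftRight_eq_div_pow]
  have h2 : PySem.Int.band ((k >>> m : Nat) : Int) 1 = (((k >>> m) &&& 1 : Nat) : Int) := by
    exact_mod_cast PySem.Int.band_natCast (k >>> m) 1
  rw [h1, h2, Bool.eq_iff_iff]
  simp only [beq_iff_eq, Nat.testBit_eq_decide_div_mod_eq, decide_eq_true_eq, Nat.and_one_is_mod,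
    Nat.shiftRight_eq_div_pow]
  omega

theorem pv_tb_log2 (k : Nat) (h : 0 < k) : k.testBit k.log2 = true := by
  have h1 := Nat.log2_self_le h.ne'
  have h2 : k < 2 ^ (k.log2 + 1) := by rw [← Nat.log2_lt h.ne']; omega
  rw [Nat.testBit_eq_decide_div_mod_eq]
  have hp : 0 < 2 ^ k.log2 := by positivity
  have h3 : 2 ^ (k.log2 + 1) = 2 * 2 ^ k.log2 := by ring
  have hd : k / 2 ^ k.log2 = 1 := by
    have ha := Nat.div_lt_iff_lt_mul (x := k) (y := 2) hp
    have hb := Nat.le_div_iff_mul_le (x := 1) (y := k) hp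
    omega
  simp [hd]

theorem pv_bitLength (i : Nat) (h : 0 < i) : PySem.Int.bitLength (i : Int) - 1 = Nat.log2 i := by
  have hne : (i : Int) ≠ 0 := by exact_mod_cast h.ne'
  have h1 := PySem.Int.lt_two_pow_bitLength (i : Int)
  have h2 := PySem.Int.two_pow_bitLength_le (i : Int) hne
  rw [Int.natAbs_natCast] at h1 h2
  have h3 : i.log2 < PySem.Int.bitLength (i : Int) := (Nat.log2_lt h.ne').2 h1
  have h4 : PySem.Int.bitLength (i : Int) - 1 ≤ i.log2 := (Nat.le_log2 h.ne').2 h2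
  omega

theorem pv_xor_lt (k : Nat) (h : 0 < k) : k ^^^ 2 ^ k.log2 < k := by
  refine Nat.lt_of_testBit k.log2 ?_ (pv_tb_log2 k h) ?_
  · simp [Nat.testBit_xor, pv_tb_log2 k h]
  · intro j hj
    simp [Nat.testBit_xor, hj.ne]

theorem pv_step (A : List Int) (k : Nat) (h0 : 0 < k) (hk : k < 2 ^ A.length) :
    pvF A k = pvF A (k ^^^ 2 ^ k.log2) + A.getD k.log2 0 := by
  have hj : k.log2 < A.length := (Nat.log2_lt h0.ne').2 hk
  have hmem : k.log2 ∈ Finset.range A.length := Finset.mem_range.2 hj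
  unfold pvF
  rw [← Finset.add_sum_erase _ _ hmem, ← Finset.add_sum_erase _ _ hmem]
  have hbit : (k ^^^ 2 ^ k.log2).testBit k.log2 = false := by
    simp [Nat.testBit_xor, pv_tb_log2 k h0]
  rw [pv_tb_log2 k h0, hbit]
  have hrest : ∀ m ∈ (Finset.range A.length).erase k.log2,
      (if (k ^^^ 2 ^ k.log2).testBit m then A.getD m 0 else 0)
        = (if k.testBit m then A.getD m 0 else 0) := by
    intro m hm
    have hne : m ≠ k.log2 := Finset.ne_of_mem_erase hm
    simp [Nat.testBit_xor, Ne.symm hne]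
  rw [Finset.sum_congr rfl hrest]
  simp
  ring

theorem pv_dp (A : List Int) (m : Nat) (hm : m ≤ 2 ^ A.length - 1) :
    ((List.range' 1 m).foldl
        (fun (sums : List Int) (i : Nat) =>
          let j := PySem.Int.bitLength (i : Int) - 1
          sums.set i (sums.getD (i ^^^ (1 <<< j)) 0 + A.getD j 0))
        (List.replicate (2 ^ A.length) 0)).length = 2 ^ A.length ∧
    ∀ k, k ≤ m → k < 2 ^ A.length →
      ((List.range' 1 m).foldl
        (fun (sums : List Int) (i : Nat) =>
          let j := PySem.Int.bitLength (i : Int) - 1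
          sums.set i (sums.getD (i ^^^ (1 <<< j)) 0 + A.getD j 0))
        (List.replicate (2 ^ A.length) 0)).getD k 0 = pvF A k := by
  induction m with
  | zero =>
    refine ⟨by simp, ?_⟩
    intro k hk hlt
    interval_cases k
    have : (0 : Nat) < 2 ^ A.length := by positivity
    simp [List.getD, this, pvF, Nat.zero_testBit]
  | succ m ih =>
    have hm' : m ≤ 2 ^ A.length - 1 := by omega
    obtain ⟨hlen, hval⟩ := ih hm'
    have hsz : 0 < 2 ^ A.length := by positivity
    have hmlt : m + 1 < 2 ^ A.length := by omega
    rw [List.range'_concat]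
    simp only [List.foldl_append, List.foldl_cons, List.foldl_nil]
    set S := (List.range' 1 m).foldl
        (fun (sums : List Int) (i : Nat) =>
          let j := PySem.Int.bitLength (i : Int) - 1
          sums.set i (sums.getD (i ^^^ (1 <<< j)) 0 + A.getD j 0))
        (List.replicate (2 ^ A.length) 0) with hS
    have hidx : 1 + 1 * m = m + 1 := by omega
    rw [hidx]
    have hj : PySem.Int.bitLength ((m + 1 : Nat) : Int) - 1 = (m + 1).log2 :=
      pv_bitLength (m + 1) (by omega)
    have hpow : (1 : Nat) <<< (m + 1).log2 = 2 ^ (m + 1).log2 := Nat.one_shiftLeft _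
    have hrlt : (m + 1) ^^^ 2 ^ (m + 1).log2 < m + 1 := pv_xor_lt (m + 1) (by omega)
    constructor
    · simpa [List.length_set] using hlen
    · intro k hk hklt
      simp only [hj, hpow]
      have hv : S.getD ((m + 1) ^^^ 2 ^ (m + 1).log2) 0 = pvF A ((m + 1) ^^^ 2 ^ (m + 1).log2) :=
        hval _ (by omega) (by omega)
      rcases Nat.lt_or_ge k (m + 1) with hcase | hcase
      · -- untouched entry
        have := hval k (by omega) hklt
        rw [List.getD, List.getElem?_set]
        simp only [show ¬ (m + 1 = k) by omega, if_false]
        exact this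
      · have hke : k = m + 1 := by omega
        subst hke
        rw [List.getD, List.getElem?_set]
        simp only [hlen, hmlt, if_pos]
        rw [hv] at *
        simp only [Option.getD_some]
        rw [pv_step A (m + 1) (by omega) hmlt, hv]
  -- note: getD above

theorem pv_enum (h : Nat → Int) : ∀ (n s : Nat),
    PySem.List.enumerate ((List.range' s n).map h) (s : Int)
      = (List.range' s n).map (fun (k : Nat) => ((k : Int), h k)) := by
  intro n
  induction n with
  | zero => intro s; simp
  | succ n ih =>
    intro s
    rw [List.range'_succ]
    simp only [List.map_cons, PySem.List.enumerate_cons]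
    rw [show ((s : Int) + 1) = ((s + 1 : Nat) : Int) by push_cast; ring, ih (s + 1)]

theorem pv_enum0 (h : Nat → Int) (n : Nat) :
    PySem.List.enumerate ((List.range n).map h) = (List.range n).map (fun (k : Nat) => ((k : Int), h k)) := by
  rw [List.range_eq_range']
  simpa using pv_enum h n 0

theorem pvA_pre (A : List Int) :
    (PySem.List.pyRange 0 ((1 : Int) <<< A.length) 1).foldl
      (fun value i =>
        value ++ [(PySem.Str.zfill (PySem.Int.toBin i) 16,
          ((PySem.List.pyRange 0 (PySem.List.len A) 1).foldl
            (fun output (j : Int) =>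
              if PySem.Int.band (i >>> j.toNat) 1 == 1 then output ++ [PySem.List.pyGetD A j 0]
              else output) []).sum)]) []
    = pvPre A := by
  rw [PySem.List.foldl_append_singleton_eq_map]
  have hsz : (1 : Int) <<< A.length = ((2 ^ A.length : Nat) : Int) := by
    rw [Int.shiftLeft_eq]; push_cast; ring
  rw [hsz, PySem.List.pyRange_zero_nat, List.map_map, List.nil_append]
  unfold pvPre
  apply List.map_congr_left
  intro k _
  simp only [Function.comp]
  congr 1
  rw [PySem.List.foldl_append_if]
  simp only [List.nil_append, PySem.List.len_eq, PySem.List.pyRange_zero_nat, List.filter_map,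
    List.map_map]
  simp only [Function.comp_def, Int.toNat_natCast, pv_cond,
    PySem.List.pyGetD_natCast]
  rw [pv_sum_filter]
  rfl

theorem pvA (A : List Int) : bit_full_search2 A =
    ((PySem.List.sorted (pvPre A) (fun x : String × Int => x.2)).map Prod.fst,
     (PySem.List.sorted (pvPre A) (fun x : String × Int => x.2)).map Prod.snd) := by
  simp only [bit_full_search2]
  rw [pvA_pre]
  set v := PySem.List.sorted (pvPre A) (fun x : String × Int => x.2) with hv
  have h1 := PySem.List.map_pyGetD_pyRange_zero v (("", 0) : String × Int)
  simp only [Prod.mk.injEq]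
  constructor
  · rw [show (fun k => (PySem.List.pyGetD v k (("", 0) : String × Int)).1)
        = (Prod.fst ∘ fun k => PySem.List.pyGetD v k (("", 0) : String × Int)) from rfl,
      ← List.map_map, h1]
  · rw [show (fun k => (PySem.List.pyGetD v k (("", 0) : String × Int)).2)
        = (Prod.snd ∘ fun k => PySem.List.pyGetD v k (("", 0) : String × Int)) from rfl,
      ← List.map_map, h1]

theorem pvB (A : List Int) : bit_full_search2_alt A =
    ((PySem.List.sorted (pvPre A) (fun x : String × Int => x.2)).map Prod.fst,
     (PySem.List.sorted (pvPre A) (fun x : String × Int => x.2)).map Prod.snd) := by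
  simp only [bit_full_search2_alt]
  rw [Nat.one_shiftLeft]
  obtain ⟨hlen, hval⟩ := pv_dp A (2 ^ A.length - 1) le_rfl
  have hsums : (List.range' 1 (2 ^ A.length - 1)).foldl
      (fun (sums : List Int) (i : Nat) =>
        let j := PySem.Int.bitLength (i : Int) - 1
        sums.set i (sums.getD (i ^^^ (1 <<< j)) 0 + A.getD j 0))
      (List.replicate (2 ^ A.length) 0) = (List.range (2 ^ A.length)).map (pvF A) := by
    apply List.ext_getElem
    · rw [hlen]; simp
    · intro k h1 h2
      have hk : k < 2 ^ A.length := by rw [hlen] at h1; exact h1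
      have hh := hval k (by omega) hk
      rw [List.getD_eq_getElem _ _ h1] at hh
      simp only [List.getElem_map, List.getElem_range]
      exact hh
  rw [hsums, pv_enum0, List.map_map]
  rfl

-- ===== VERDICT (by name: the statement is the Claim_ definition above) =====
theorem bit_full_search2_spec : Claim_equal_bit_full_search2 := by
  intro A _
  unfold Spec_bit_full_search2
  rw [pvA, pvB]
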